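-- pv_equiv track=rewrite | github.com/lsh23/algorithm-exercise | 스택/괄호의값.py | solve
-- ===== SOURCE A (Python) =====
-- from typing import List
--
-- def solve(bracket_expr) -> int:
--     st:List[str] = []
--     if len(bracket_expr) % 2 != 0:
--         return 0
--     for bracket in bracket_expr:
--         if bracket == "[":
--             st.append(bracket)
--         if bracket == "(":
--             st.append(bracket)
--         if bracket == "]":
--             if len(st) == 0:
--                 return 0
--             tmp = 0
--             while st and st[-1] != "[":
--                 if st[-1] == "(":
--                     return 0
--                 tmp += int(st.pop())
--             if st:
--                 st.pop()
--                 if tmp == 0: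
--                     st.append(3)
--                 else:
--                     st.append(3*tmp)
--             else:
--                 return 0
--         if bracket == ")":
--             if len(st) == 0:
--                 return 0
--             tmp = 0
--             while st and st[-1] != "(":
--                 if st[-1] == "[":
--                     return 0
--                 tmp += int(st.pop())
--             if st:
--                 st.pop()
--                 if tmp == 0:
--                     st.append(2)
--                 else:
--                     st.append(2*tmp)
--             else:
--                 return 0
--     for x in st:
--         if x == "[" or x == "(":
--             return 0
--
--     return sum(st)
-- ===== SOURCE B (Python) =====
-- def solve(bracket_expr) -> int:
--     if len(bracket_expr) % 2 != 0:
--         return 0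
--     st = []
--     mul = 1
--     ans = 0
--     prev = ''
--     for ch in bracket_expr:
--         if ch == '(':
--             st.append(ch)
--             mul *= 2
--             prev = ch
--         elif ch == '[':
--             st.append(ch)
--             mul *= 3
--             prev = ch
--         elif ch == ')':
--             if not st or st[-1] != '(':
--                 return 0
--             if prev == '(':
--                 ans += mul
--             mul //= 2
--             st.pop()
--             prev = ch
--         elif ch == ']':
--             if not st or st[-1] != '[':
--                 return 0
--             if prev == '[':
--                 ans += mul
--             mul //= 3
--             st.pop()
--             prev = ch
--     if st:
--         return 0
--     return ans
-- ===== Notes on version B (the rewrite author's own statement) =====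
-- stated objective: alternative
-- what changed: Replaces A's heterogeneous stack of partial sums (closing a bracket pops and re-sums the values above the matching open) by a running-multiplier scan: the stack holds only open brackets, a multiplier tracks the product of enclosing weights, and each innermost pair adds the multiplier to the answer once.
import Mathlib
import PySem

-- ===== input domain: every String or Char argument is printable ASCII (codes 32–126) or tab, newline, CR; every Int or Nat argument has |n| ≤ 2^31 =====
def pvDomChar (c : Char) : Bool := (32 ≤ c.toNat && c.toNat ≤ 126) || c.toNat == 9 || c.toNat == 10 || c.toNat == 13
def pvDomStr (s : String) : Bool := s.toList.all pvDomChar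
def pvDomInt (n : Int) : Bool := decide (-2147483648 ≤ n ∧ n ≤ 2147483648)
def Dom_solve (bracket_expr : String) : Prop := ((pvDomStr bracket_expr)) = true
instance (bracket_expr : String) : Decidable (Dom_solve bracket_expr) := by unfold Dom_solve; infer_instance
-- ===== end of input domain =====

-- B replaces A's stack of partial sums by a running-multiplier scan (stack of open
-- brackets only); same return value everywhere, no speed claim.

-- ===== PORT A =====
-- A's Python stack holds the strings "[", "(" and ints; top of the Python list is the
-- HEAD of the Lean list here (a faithful stack representation).
inductive AItem
  | op : Char → AItem
  | num : Int → AItem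
deriving DecidableEq, Repr

-- `while st and st[-1] != openc: if st[-1] == badc: return 0; tmp += int(st.pop())`
-- (none = `return 0`).  Only `op '('` and `op '['` are ever pushed, so an op that is
-- not `badc` is `openc` and ends the loop — exact on all reachable stacks.
def popWhile (badc : Char) : List AItem → Int → Option (Int × List AItem)
  | [], tmp => some (tmp, [])
  | AItem.op c :: rest, tmp =>
      if c = badc then none else some (tmp, AItem.op c :: rest)
  | AItem.num n :: rest, tmp => popWhile badc rest (tmp + n)

-- the `]` / `)` branch of A's loop (w = 3 / 2); none = `return 0`
def closeStep (badc : Char) (w : Int) (st : List AItem) : Option (List AItem) :=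
  if st.length = 0 then none
  else
    match popWhile badc st 0 with
    | none => none
    | some (tmp, rest) =>
      match rest with
      | [] => none
      | _ :: rest' => some (AItem.num (if tmp = 0 then w else w * tmp) :: rest')

-- A's four `if` branches (their conditions are mutually exclusive, so sequential ifs
-- are exact); any other character leaves the stack unchanged.
def aStep (st : List AItem) (c : Char) : Option (List AItem) :=
  if c = '[' then some (AItem.op '[' :: st)
  else if c = '(' then some (AItem.op '(' :: st)
  else if c = ']' then closeStep '(' 3 st
  else if c = ')' then closeStep '[' 2 st
  else some st

-- `for x in st: if x == "[" or x == "(": return 0` then `sum(st)` (ops are always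
-- '[' or '(' in A, so "any op" is that test; only nums remain when summing)
def aFinal (st : List AItem) : Int :=
  if st.any (fun x => match x with | AItem.op _ => true | AItem.num _ => false) then 0
  else st.foldl (fun s x => s + match x with | AItem.num n => n | AItem.op _ => 0) 0

def solve (bracket_expr : String) : Int :=
  if PySem.Str.len bracket_expr % 2 ≠ 0 then 0
  else
    match bracket_expr.toList.foldl (fun o c => o.bind (fun st => aStep st c)) (some []) with
    | none => 0
    | some st => aFinal st

-- ===== PORT B =====
-- B's state: (stack of open brackets, multiplier, answer, previous bracket char);
-- Python's initial prev = '' is only ever compared with '(' and '[', ported as ' '.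
def bStep : (List Char × Int × Int × Char) → Char → Option (List Char × Int × Int × Char)
  | (st, mul, ans, prev), c =>
    if c = '(' then some ('(' :: st, mul * 2, ans, c)
    else if c = '[' then some ('[' :: st, mul * 3, ans, c)
    else if c = ')' then
      -- `if not st or st[-1] != '(': return 0` then `st.pop()`
      if st.head? ≠ some '(' then none
      else some (st.tail, PySem.Int.floordiv mul 2, if prev = '(' then ans + mul else ans, c)
    else if c = ']' then
      if st.head? ≠ some '[' then none
      else some (st.tail, PySem.Int.floordiv mul 3, if prev = '[' then ans + mul else ans, c)
    else some (st, mul, ans, prev)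

def solve_alt (bracket_expr : String) : Int :=
  if PySem.Str.len bracket_expr % 2 ≠ 0 then 0
  else
    match bracket_expr.toList.foldl (fun o t => o.bind (fun s => bStep s t)) (some ([], 1, 0, ' ')) with
    | none => 0
    | some (st, _, ans, _) => if st = [] then ans else 0

-- ===== PRECONDITION & SPEC =====
def Spec_solve (bracket_expr : String) (out : Int) : Prop := out = solve_alt bracket_expr
instance (bracket_expr : String) (out : Int) : Decidable (Spec_solve bracket_expr out) := by unfold Spec_solve; infer_instance

-- ===== CLAIM (what is proved, stated in full; the proofs are below) =====
def Claim_equal_solve : Prop := ∀ (bracket_expr : String), Dom_solve bracket_expr → Spec_solve bracket_expr (solve bracket_expr)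

-- ===== LEMMAS AND PROOFS =====

-- product of the weights of the open brackets on B's stack
def W : List Char → Int
  | [] => 1
  | c :: r => (if c = '(' then 2 else 3) * W r

-- the open brackets sitting on A's stack, top first
def opens : List AItem → List Char
  | [] => []
  | AItem.op c :: r => c :: opens r
  | AItem.num _ :: r => opens r

-- potential: each pending number, weighted by the opens below it
def Phi : List AItem → Int
  | [] => 0
  | AItem.op _ :: r => Phi r
  | AItem.num n :: r => n * W (opens r) + Phi r

def leadSum : List AItem → Int
  | AItem.num n :: r => n + leadSum r
  | _ => 0

def dropNums : List AItem → List AItem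
  | AItem.num _ :: r => dropNums r
  | l => l

-- simulation invariant between A's stack and B's state
def SimInv (sA : List AItem) (t : List Char × Int × Int × Char) : Prop :=
  opens sA = t.1 ∧ t.2.1 = W t.1 ∧ t.2.2.1 = Phi sA ∧
  (match sA with
   | [] => True
   | AItem.op c :: _ => t.2.2.2 = c
   | AItem.num _ :: _ => t.2.2.2 = ')' ∨ t.2.2.2 = ']') ∧
  (∀ c, AItem.op c ∈ sA → c = '(' ∨ c = '[') ∧
  (∀ n, AItem.num n ∈ sA → 0 < n)

theorem popWhile_eq (badc : Char) (sA : List AItem) (t0 : Int) :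
    popWhile badc sA t0 =
      match dropNums sA with
      | AItem.op c :: r => if c = badc then none else some (t0 + leadSum sA, AItem.op c :: r)
      | [] => some (t0 + leadSum sA, [])
      | AItem.num n :: r => popWhile badc (AItem.num n :: r) t0 := by
  induction sA generalizing t0 with
  | nil => simp [popWhile, dropNums, leadSum]
  | cons x r ih =>
    cases x with
    | op c => simp [popWhile, dropNums, leadSum]
    | num n =>
      rw [show dropNums (AItem.num n :: r) = dropNums r from rfl,
          show leadSum (AItem.num n :: r) = n + leadSum r from rfl,
          show popWhile badc (AItem.num n :: r) t0 = popWhile badc r (t0 + n) from rfl,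
          ih (t0 + n)]
      cases h : dropNums r with
      | nil => simp [add_comm, add_left_comm]
      | cons y r' =>
        cases y with
        | op c => by_cases hc : c = badc <;> simp [hc, add_comm, add_left_comm]
        | num m =>
          -- dropNums never has a num at its head
          exfalso
          clear ih
          induction r with
          | nil => simp [dropNums] at h
          | cons z r2 ih2 =>
            cases z with
            | op a => simp [dropNums] at h
            | num a => exact ih2 (by simpa [dropNums] using h)

theorem dropNums_head_not_num (sA : List AItem) :
    ∀ n r, dropNums sA ≠ AItem.num n :: r := by
  induction sA with
  | nil => intro n r; simp [dropNums]
  | cons x s ih =>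
    cases x with
    | op c => intro n r; simp [dropNums]
    | num m => intro n r; simpa [dropNums] using ih n r

theorem opens_dropNums (sA : List AItem) : opens (dropNums sA) = opens sA := by
  induction sA with
  | nil => rfl
  | cons x s ih => cases x with
    | op c => rfl
    | num n => simpa [dropNums, opens] using ih

theorem Phi_split (sA : List AItem) :
    Phi sA = leadSum sA * W (opens sA) + Phi (dropNums sA) := by
  induction sA with
  | nil => simp [Phi, leadSum, dropNums]
  | cons x s ih =>
    cases x with
    | op c => simp [Phi, leadSum, dropNums]
    | num n =>
      rw [show Phi (AItem.num n :: s) = n * W (opens s) + Phi s from rfl,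
          show leadSum (AItem.num n :: s) = n + leadSum s from rfl,
          show dropNums (AItem.num n :: s) = dropNums s from rfl,
          show opens (AItem.num n :: s) = opens s from rfl, ih]
      ring

theorem leadSum_nonneg (sA : List AItem) (hpos : ∀ n, AItem.num n ∈ sA → 0 < n) :
    0 ≤ leadSum sA := by
  induction sA with
  | nil => simp [leadSum]
  | cons x s ih =>
    cases x with
    | op c => simp [leadSum]
    | num n =>
      have h1 : 0 < n := hpos n (by simp)
      have h2 : 0 ≤ leadSum s := ih (fun m hm => hpos m (List.mem_cons_of_mem _ hm))
      rw [show leadSum (AItem.num n :: s) = n + leadSum s from rfl]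
      omega

theorem leadSum_pos (n : Int) (r : List AItem)
    (hpos : ∀ m, AItem.num m ∈ AItem.num n :: r → 0 < m) :
    0 < leadSum (AItem.num n :: r) := by
  have h1 : 0 < n := hpos n (by simp)
  have h2 : 0 ≤ leadSum r := leadSum_nonneg r (fun m hm => hpos m (List.mem_cons_of_mem _ hm))
  rw [show leadSum (AItem.num n :: r) = n + leadSum r from rfl]
  omega

theorem mem_dropNums (x : AItem) (sA : List AItem) (h : x ∈ dropNums sA) : x ∈ sA := by
  induction sA with
  | nil => simpa [dropNums] using h
  | cons y s ih =>
    cases y with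
    | op c => simpa [dropNums] using h
    | num n => exact List.mem_cons_of_mem _ (ih (by simpa [dropNums] using h))

theorem fdiv_cancel (w k : Int) (hw : w ≠ 0) : PySem.Int.floordiv (w * k) w = k := by
  simp [PySem.Int.floordiv, Int.mul_fdiv_cancel_left _ hw]

-- one close step preserves the simulation (covers ')' and ']')
theorem close_sim (openc badc : Char) (w : Int) (hw : w ≠ 0)
    (hwv : w = (if openc = '(' then 2 else 3))
    (hob : (openc = '(' ∧ badc = '[') ∨ (openc = '[' ∧ badc = '('))
    (sA : List AItem) (t : List Char × Int × Int × Char) (hI : SimInv sA t) :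
    (closeStep badc w sA = none ∧
        (match t.1 with | c :: _ => ¬ (c = openc) | [] => True)) ∨
    (∃ rest' v restB,
        closeStep badc w sA = some (AItem.num v :: rest') ∧ t.1 = openc :: restB ∧
        SimInv (AItem.num v :: rest')
          (restB, PySem.Int.floordiv t.2.1 w,
            (if t.2.2.2 = openc then t.2.2.1 + t.2.1 else t.2.2.1), ')')) := by
  obtain ⟨h1, h2, h3, h4, h5, h6⟩ := hI
  cases sA with
  | nil =>
    left
    exact ⟨by simp [closeStep], by rw [← h1]; simp [opens]⟩
  | cons x s =>
    cases hD : dropNums (x :: s) with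
    | nil =>
      left
      constructor
      · simp [closeStep, popWhile_eq badc (x :: s) 0, hD]
      · rw [← h1, ← opens_dropNums, hD]; simp [opens]
    | cons y r' =>
      cases y with
      | num m => exact absurd hD (dropNums_head_not_num _ _ _)
      | op c =>
        have hc : c = '(' ∨ c = '[' := h5 c (mem_dropNums _ _ (by rw [hD]; simp))
        have hopens : opens (x :: s) = c :: opens r' := by rw [← opens_dropNums, hD]; rfl
        by_cases hcb : c = badc
        · left
          constructor
          · simp [closeStep, popWhile_eq badc (x :: s) 0, hD, hcb]
          · rw [← h1, hopens]
            show ¬ c = openc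
            subst hcb
            rcases hob with ⟨ho, hb⟩ | ⟨ho, hb⟩ <;> rw [hb, ho] <;> decide
        · have hco : c = openc := by
            rcases hob with ⟨ho, hb⟩ | ⟨ho, hb⟩ <;> rcases hc with h | h <;> subst_vars <;>
              first | rfl | (exfalso; exact hcb rfl)
          subst hco
          set tmp := leadSum (x :: s) with htmp
          have hnn : 0 ≤ tmp := leadSum_nonneg _ h6
          have ht0 : popWhile badc (x :: s) 0 = some (tmp, AItem.op c :: r') := by
            rw [popWhile_eq badc (x :: s) 0, hD]
            simp [hcb, ← htmp]
          have hA : closeStep badc w (x :: s)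
              = some (AItem.num (if tmp = 0 then w else w * tmp) :: r') := by
            simp [closeStep, ht0]
          have htmpOk : (tmp = 0) ↔ t.2.2.2 = c := by
            cases x with
            | op a =>
              have hax : AItem.op a :: s = AItem.op c :: r' := by
                rw [show AItem.op a :: s = dropNums (AItem.op a :: s) from rfl, hD]
              have ha2 : a = c := by
                injection hax with hh _
                injection hh
              have h4' : t.2.2.2 = a := h4
              have hz : tmp = 0 := by rw [htmp]; rfl
              exact ⟨fun _ => ha2 ▸ h4', fun _ => hz⟩
            | num m =>
              have hpos : 0 < tmp := leadSum_pos m s h6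
              have h4' : t.2.2.2 = ')' ∨ t.2.2.2 = ']' := h4
              constructor
              · intro h; omega
              · intro h
                exfalso
                rcases h4' with h4' | h4' <;> rw [h4'] at h <;>
                  rcases hob with ⟨ho, _⟩ | ⟨ho, _⟩ <;> rw [ho] at h <;> exact absurd h (by decide)
          have hW : t.2.1 = w * W (opens r') := by
            rw [h2, ← h1, hopens, hwv]; rfl
          have hPhi : Phi (x :: s) = tmp * (w * W (opens r')) + Phi r' := by
            rw [Phi_split, hD, hopens, hwv]; rfl
          have hvpos : 0 < (if tmp = 0 then w else w * tmp) := by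
            by_cases h0 : tmp = 0
            · rw [if_pos h0, hwv]; split <;> norm_num
            · rw [if_neg h0, hwv]
              have h0t : (0 : Int) < tmp := by omega
              split <;> positivity
          right
          refine ⟨r', _, opens r', hA, by rw [← h1, hopens], ?_, ?_, ?_, ?_, ?_, ?_⟩
          · rfl
          · show PySem.Int.floordiv t.2.1 w = W (opens r')
            rw [hW, fdiv_cancel w (W (opens r')) hw]
          · show (if t.2.2.2 = c then t.2.2.1 + t.2.1 else t.2.2.1)
              = Phi (AItem.num (if tmp = 0 then w else w * tmp) :: r')
            by_cases h0 : tmp = 0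
            · rw [if_pos (htmpOk.mp h0), if_pos h0, h3, hPhi, hW, h0,
                show Phi (AItem.num w :: r') = w * W (opens r') + Phi r' from rfl]
              ring
            · rw [if_neg (fun h => h0 (htmpOk.mpr h)), if_neg h0, h3, hPhi,
                show Phi (AItem.num (w * tmp) :: r') = (w * tmp) * W (opens r') + Phi r' from rfl]
              ring
          · left; rfl
          · intro a ha
            rcases List.mem_cons.mp ha with h | h
            · exact absurd h (by simp)
            · exact h5 a (mem_dropNums _ _ (by rw [hD]; exact List.mem_cons_of_mem _ h))
          · intro n hn
            rcases List.mem_cons.mp hn with h | h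
            · injection h with h
              rw [h]; exact hvpos
            · exact h6 n (mem_dropNums _ _ (by rw [hD]; exact List.mem_cons_of_mem _ h))

-- one loop step preserves the simulation
theorem step_sim (c : Char) (sA : List AItem) (t : List Char × Int × Int × Char)
    (hI : SimInv sA t) :
    (aStep sA c = none ∧ bStep t c = none) ∨
    (∃ sA' t', aStep sA c = some sA' ∧ bStep t c = some t' ∧ SimInv sA' t') := by
  obtain ⟨t1, t2, t3, t4⟩ := t
  obtain ⟨h1, h2, h3, h4, h5, h6⟩ := hI
  have h1' : opens sA = t1 := h1
  have h2' : t2 = W t1 := h2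
  have h3' : t3 = Phi sA := h3
  by_cases hbr : c = '['
  · subst hbr
    right
    refine ⟨AItem.op '[' :: sA, ('[' :: t1, t2 * 3, t3, '['), rfl, by simp [bStep],
      ?_, ?_, ?_, rfl, ?_, ?_⟩
    · show '[' :: opens sA = '[' :: t1
      rw [h1']
    · show t2 * 3 = W ('[' :: t1)
      rw [h2', show W ('[' :: t1) = 3 * W t1 from by simp [W]]
      ring
    · exact h3'
    · intro a ha
      rcases List.mem_cons.mp ha with h | h
      · injection h with h; right; exact h
      · exact h5 a h
    · intro n hn
      rcases List.mem_cons.mp hn with h | h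
      · exact absurd h (by simp)
      · exact h6 n h
  · by_cases hbp : c = '('
    · subst hbp
      right
      refine ⟨AItem.op '(' :: sA, ('(' :: t1, t2 * 2, t3, '('), rfl, by simp [bStep],
        ?_, ?_, ?_, rfl, ?_, ?_⟩
      · show '(' :: opens sA = '(' :: t1
        rw [h1']
      · show t2 * 2 = W ('(' :: t1)
        rw [h2', show W ('(' :: t1) = 2 * W t1 from by simp [W]]
        ring
      · exact h3'
      · intro a ha
        rcases List.mem_cons.mp ha with h | h
        · injection h with h; left; exact h
        · exact h5 a h
      · intro n hn
        rcases List.mem_cons.mp hn with h | h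
        · exact absurd h (by simp)
        · exact h6 n h
    · by_cases hbc : c = ']'
      · subst hbc
        have := close_sim '[' '(' 3 (by norm_num) (by decide) (Or.inr ⟨rfl, rfl⟩)
          sA (t1, t2, t3, t4) ⟨h1, h2, h3, h4, h5, h6⟩
        rcases this with ⟨hA, hB⟩ | ⟨rest', v, restB, hA, hT, hI'⟩
        · left
          refine ⟨by simpa [aStep] using hA, ?_⟩
          cases t1 with
          | nil => simp [bStep]
          | cons a r =>
            have ha : ¬ (a = '[') := hB
            simp [bStep, ha]
        · right
          have hT' : t1 = '[' :: restB := hT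
          refine ⟨AItem.num v :: rest', (restB, PySem.Int.floordiv t2 3,
              (if t4 = '[' then t3 + t2 else t3), ']'), by simpa [aStep] using hA, ?_, ?_⟩
          · rw [show (t1, t2, t3, t4) = ('[' :: restB, t2, t3, t4) from by rw [hT'], ]
            simp [bStep]
          · obtain ⟨i1, i2, i3, _, i5, i6⟩ := hI'
            exact ⟨i1, i2, i3, Or.inr rfl, i5, i6⟩
      · by_cases hbd : c = ')'
        · subst hbd
          have := close_sim '(' '[' 2 (by norm_num) (by decide) (Or.inl ⟨rfl, rfl⟩)
            sA (t1, t2, t3, t4) ⟨h1, h2, h3, h4, h5, h6⟩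
          rcases this with ⟨hA, hB⟩ | ⟨rest', v, restB, hA, hT, hI'⟩
          · left
            refine ⟨by simpa [aStep] using hA, ?_⟩
            cases t1 with
            | nil => simp [bStep]
            | cons a r =>
              have ha : ¬ (a = '(') := hB
              simp [bStep, ha]
          · right
            have hT' : t1 = '(' :: restB := hT
            refine ⟨AItem.num v :: rest', (restB, PySem.Int.floordiv t2 2,
                (if t4 = '(' then t3 + t2 else t3), ')'), by simpa [aStep] using hA, ?_, ?_⟩
            · rw [show (t1, t2, t3, t4) = ('(' :: restB, t2, t3, t4) from by rw [hT'], ]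
              simp [bStep]
            · exact hI'
        · right
          exact ⟨sA, (t1, t2, t3, t4), by simp [aStep, hbr, hbp, hbc, hbd],
            by simp [bStep, hbr, hbp, hbc, hbd], h1, h2, h3, h4, h5, h6⟩

theorem foldl_none_a (cs : List Char) :
    cs.foldl (fun o c => o.bind (fun st => aStep st c)) none = none := by
  induction cs <;> simp_all

theorem foldl_none_b (cs : List Char) :
    cs.foldl (fun o c => o.bind (fun s => bStep s c)) none = none := by
  induction cs <;> simp_all

-- the whole fold preserves the simulation
theorem fold_sim (cs : List Char) (sA : List AItem) (t : List Char × Int × Int × Char)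
    (hI : SimInv sA t) :
    (cs.foldl (fun o c => o.bind (fun st => aStep st c)) (some sA) = none ∧
     cs.foldl (fun o c => o.bind (fun s => bStep s c)) (some t) = none) ∨
    (∃ sA' t',
      cs.foldl (fun o c => o.bind (fun st => aStep st c)) (some sA) = some sA' ∧
      cs.foldl (fun o c => o.bind (fun s => bStep s c)) (some t) = some t' ∧ SimInv sA' t') := by
  induction cs generalizing sA t with
  | nil => right; exact ⟨sA, t, rfl, rfl, hI⟩
  | cons c cs ih =>
    rcases step_sim c sA t hI with ⟨hA, hB⟩ | ⟨sA', t', hA, hB, hI'⟩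
    · left
      rw [List.foldl_cons, List.foldl_cons,
        show (some sA).bind (fun st => aStep st c) = aStep sA c from rfl,
        show (some t).bind (fun s => bStep s c) = bStep t c from rfl, hA, hB]
      exact ⟨foldl_none_a cs, foldl_none_b cs⟩
    · rw [List.foldl_cons, List.foldl_cons,
        show (some sA).bind (fun st => aStep st c) = aStep sA c from rfl,
        show (some t).bind (fun s => bStep s c) = bStep t c from rfl, hA, hB]
      exact ih sA' t' hI'

-- when no opens remain, A's final sum equals the potential
theorem sum_eq_phi (sA : List AItem) (h : opens sA = []) (acc : Int) :
    sA.foldl (fun s x => s + match x with | AItem.num n => n | AItem.op _ => 0) acc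
      = acc + Phi sA := by
  induction sA generalizing acc with
  | nil => simp [Phi]
  | cons x s ih =>
    cases x with
    | op c => simp [opens] at h
    | num n =>
      have hs : opens s = [] := by simpa [opens] using h
      rw [List.foldl_cons, ih hs]
      rw [show Phi (AItem.num n :: s) = n * W (opens s) + Phi s from rfl, hs]
      simp [W]; ring

theorem opens_nil_no_op (sA : List AItem) (h : opens sA = []) (c : Char) :
    AItem.op c ∉ sA := by
  induction sA with
  | nil => simp
  | cons x s ih =>
    cases x with
    | op a => simp [opens] at h
    | num n =>
      have := ih (by simpa [opens] using h)
      simp [this]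

theorem opens_ne_nil_ex_op (sA : List AItem) (h : opens sA ≠ []) :
    ∃ c, AItem.op c ∈ sA := by
  induction sA with
  | nil => simp [opens] at h
  | cons x s ih =>
    cases x with
    | op a => exact ⟨a, by simp⟩
    | num n =>
      obtain ⟨c, hc⟩ := ih (by simpa [opens] using h)
      exact ⟨c, List.mem_cons_of_mem _ hc⟩

theorem final_eq (sA : List AItem) (t : List Char × Int × Int × Char) (hI : SimInv sA t) :
    aFinal sA = (if t.1 = [] then t.2.2.1 else 0) := by
  obtain ⟨h1, h2, h3, h4, h5, h6⟩ := hI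
  by_cases ho : opens sA = []
  · have hanyf : sA.any (fun x => match x with | AItem.op _ => true | AItem.num _ => false) = false := by
      rw [List.any_eq_false]
      intro x hx
      cases x with
      | num n => simp
      | op c => exact absurd hx (opens_nil_no_op sA ho c)
    rw [aFinal, if_neg (by simp [hanyf]), sum_eq_phi sA ho 0, ← h3, ← h1, ho]
    simp
  · obtain ⟨c, hc⟩ := opens_ne_nil_ex_op sA ho
    have hany : sA.any (fun x => match x with | AItem.op _ => true | AItem.num _ => false) = true :=
      List.any_eq_true.mpr ⟨AItem.op c, hc, rfl⟩
    rw [aFinal, if_pos (by simp [hany]), ← h1, if_neg ho]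

-- ===== VERDICT (by name: the statement is the Claim_ definition above) =====
theorem solve_spec : Claim_equal_solve := by
  intro s _hDom
  unfold Spec_solve solve solve_alt
  by_cases hodd : PySem.Str.len s % 2 ≠ 0
  · rw [if_pos hodd, if_pos hodd]
  · rw [if_neg hodd, if_neg hodd]
    have hI0 : SimInv [] ([], 1, 0, ' ') := by
      refine ⟨rfl, rfl, rfl, trivial, ?_, ?_⟩ <;> intro a ha <;> simp at ha
    rcases fold_sim s.toList [] ([], 1, 0, ' ') hI0 with ⟨hA, hB⟩ | ⟨sA', t', hA, hB, hI'⟩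
    · rw [hA, hB]
    · rw [hA, hB]
      exact final_eq sA' t' hI'
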